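-- pv_equiv track=rewrite | github.com/fyjun2071/NLP-course | python/segment_match.py | merge_pattern
-- ===== SOURCE A (Python) =====
-- def isalpha(string):
--     return all('A' <= s <= 'z' for s in string)
--
-- def is_variable(pat):
--     if pat[0] == '?':
--         idx = 0
--         for s in pat[1:]:
--             if isalpha(s):
--                 idx += 1
--             else:
--                 break
--     else:
--         return False
--     if idx > 0:
--         pattern = ''
--         for i in range(idx + 1):
--             pattern += pat.pop(0)
--         pat.insert(0, pattern)
--         return True
--     else:
--         return False
--
-- def is_pattern_segment(pat):
--     if not pat:
--         return False
--     if len(pat) > 2 and pat[0] == '?' and pat[1] == '*':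
--         idx = 1
--         for s in pat[2:]:
--             if isalpha(s):
--                 idx += 1
--             else:
--                 break
--     else:
--         return False
--     if idx > 1:
--         pattern = ''
--         for i in range(idx + 1):
--             pattern += pat.pop(0)
--         pat.insert(0, pattern)
--         return True
--     else:
--         return False
--
-- def merge_pattern(pattern):
--     if not pattern: return []
--     if is_variable(pattern):
--         return [pattern[0]] + merge_pattern(pattern[1:])
--     elif is_pattern_segment(pattern):
--         return [pattern[0]] + merge_pattern(pattern[1:])
--     else:
--         return [pattern[0]] + merge_pattern(pattern[1:])
-- ===== SOURCE B (Python) =====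
-- def merge_pattern(pattern):
--     def _alpha(s):
--         return all('A' <= c <= 'z' for c in s)
--     out = []
--     i, n = 0, len(pattern)
--     while i < n:
--         h = pattern[i]
--         if h == '?':
--             j = i + 1
--             while j < n and _alpha(pattern[j]):
--                 j += 1
--             if j > i + 1:
--                 out.append(''.join(pattern[i:j]))
--                 i = j
--                 continue
--             if i + 2 < n and pattern[i + 1] == '*':
--                 j = i + 2
--                 while j < n and _alpha(pattern[j]):
--                     j += 1
--                 if j > i + 2:
--                     out.append(''.join(pattern[i:j]))
--                     i = j
--                     continue
--         out.append(h)
--         i += 1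
--     return out
-- ===== Notes on version B (the rewrite author's own statement) =====
-- stated objective: faster
-- what changed: A re-scans and mutates the list (pop(0)/insert(0)) and recurses on slices, which is quadratic; B is a single left-to-right index loop that appends merged tokens to an output list.
import Mathlib
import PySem

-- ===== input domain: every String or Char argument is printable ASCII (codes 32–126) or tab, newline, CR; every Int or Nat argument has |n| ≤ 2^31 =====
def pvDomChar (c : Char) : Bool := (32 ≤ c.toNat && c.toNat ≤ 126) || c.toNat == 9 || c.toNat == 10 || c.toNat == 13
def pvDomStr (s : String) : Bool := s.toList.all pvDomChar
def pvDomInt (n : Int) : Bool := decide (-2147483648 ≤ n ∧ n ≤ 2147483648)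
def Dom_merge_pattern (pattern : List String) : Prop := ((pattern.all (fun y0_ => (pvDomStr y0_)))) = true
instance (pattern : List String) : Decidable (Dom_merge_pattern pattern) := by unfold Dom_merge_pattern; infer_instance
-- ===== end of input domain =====

-- B replaces A's quadratic mutate-and-recurse scheme (pop(0)/insert(0) on the list plus
-- recursion on slices) with a single linear index loop appending merged tokens.
-- A mutates its argument in place; the equivalence proved here is about the RETURN value only (B does not mutate).

-- ===== PORT A =====

-- all('A' <= s <= 'z' for s in string)
def pyIsalpha (s : String) : Bool :=
  s.toList.all (fun c => decide ('A' ≤ c) && decide (c ≤ 'z'))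

-- is_variable: returns (result, pat after mutation); the for/break loop is takeWhile,
-- the pop/insert merge is join-of-take followed by drop.
def is_variable (pat : List String) : Bool × List String :=
  match pat with
  | [] => (false, [])   -- unreachable: only called on non-empty lists (pat[0] would raise)
  | p0 :: rest =>
    if p0 = "?" then
      let idx := (rest.takeWhile pyIsalpha).length
      if idx > 0 then
        (true, String.join ((p0 :: rest).take (idx + 1)) :: (p0 :: rest).drop (idx + 1))
      else (false, p0 :: rest)
    else (false, p0 :: rest)

def is_pattern_segment (pat : List String) : Bool × List String :=
  match pat with
  | p0 :: p1 :: rest2 =>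
    if pat.length > 2 ∧ p0 = "?" ∧ p1 = "*" then
      let idx := 1 + (rest2.takeWhile pyIsalpha).length
      if idx > 1 then
        (true, String.join (pat.take (idx + 1)) :: pat.drop (idx + 1))
      else (false, pat)
    else (false, pat)
  | _ => (false, pat)   -- covers the 'if not pat' and len ≤ 2 head shapes

theorem is_variable_len (pat : List String) :
    (is_variable pat).2.length ≤ pat.length ∧ ((is_variable pat).2 = [] → pat = []) := by
  unfold is_variable
  match pat with
  | [] => simp
  | p0 :: rest =>
    simp only []
    split_ifs with h1 h2 <;> simp_all

theorem is_pattern_segment_len (pat : List String) :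
    (is_pattern_segment pat).2.length ≤ pat.length ∧ ((is_pattern_segment pat).2 = [] → pat = []) := by
  unfold is_pattern_segment
  match pat with
  | [] => simp
  | [p0] => simp
  | p0 :: p1 :: rest2 =>
    simp only []
    split_ifs with h1 h2 <;> simp_all

def merge_pattern (pattern : List String) : List String :=
  match pattern with
  | [] => []
  | p0 :: ps =>
    let r1 := is_variable (p0 :: ps)
    let q := if r1.1 then r1.2 else (is_pattern_segment r1.2).2
    match hq : q with
    | [] => []   -- unreachable: q is non-empty when pattern is
    | x :: xs => x :: merge_pattern xs
termination_by pattern.length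
decreasing_by
  have h1 := is_variable_len (p0 :: ps)
  have h2 := is_pattern_segment_len (is_variable (p0 :: ps)).2
  have hql : q.length ≤ (p0 :: ps).length := by
    dsimp only [q, r1]
    split
    · exact h1.1
    · exact le_trans h2.1 h1.1
  rw [hq] at hql
  simp_all

-- ===== PORT B =====

-- the outer while loop with index i becomes structural recursion on the suffix at i;
-- the inner while loops are takeWhile, ''.join(pattern[i:j]) is String.join.
def merge_pattern_alt (pattern : List String) : List String :=
  match pattern with
  | [] => []
  | h :: t =>
    if h = "?" then
      let a := t.takeWhile pyIsalpha
      if a.length > 0 then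
        String.join (h :: a) :: merge_pattern_alt (t.drop a.length)
      else
        match ht : t with
        | "*" :: t2 =>
          if t2.length > 0 then
            let b := t2.takeWhile pyIsalpha
            if b.length > 0 then
              String.join (h :: "*" :: b) :: merge_pattern_alt (t2.drop b.length)
            else h :: merge_pattern_alt t
          else h :: merge_pattern_alt t
        | _ => h :: merge_pattern_alt t
    else h :: merge_pattern_alt t
termination_by pattern.length
decreasing_by
  all_goals first
    | (subst ht; simp only [List.length_drop, List.length_cons]; omega)
    | (simp only [List.length_drop, List.length_cons]; omega)

-- ===== PRECONDITION & SPEC =====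
def Spec_merge_pattern (pattern : List String) (out : List String) : Prop := out = merge_pattern_alt pattern
instance (pattern : List String) (out : List String) : Decidable (Spec_merge_pattern pattern out) := by unfold Spec_merge_pattern; infer_instance

-- ===== CLAIM (what is proved, stated in full; the proofs are below) =====
def Claim_equal_merge_pattern : Prop := ∀ (pattern : List String), Dom_merge_pattern pattern → Spec_merge_pattern pattern (merge_pattern pattern)

-- ===== LEMMAS AND PROOFS =====

theorem take_length_takeWhile {α : Type} (p : α → Bool) (l : List α) :
    l.take (l.takeWhile p).length = l.takeWhile p := by
  induction l with
  | nil => simp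
  | cons a t ih =>
    by_cases h : p a = true <;> simp [h, ih]

theorem is_variable_pos (t : List String) (hA : 0 < (t.takeWhile pyIsalpha).length) :
    is_variable ("?" :: t) =
      (true, String.join ("?" :: t.takeWhile pyIsalpha) :: t.drop (t.takeWhile pyIsalpha).length) := by
  unfold is_variable
  simp [hA, List.take_succ_cons, List.drop_succ_cons, take_length_takeWhile]

theorem is_variable_zero (t : List String) (hA : (t.takeWhile pyIsalpha).length = 0) :
    is_variable ("?" :: t) = (false, "?" :: t) := by
  unfold is_variable
  simp [hA]

theorem is_variable_ne (h : String) (t : List String) (hh : ¬ h = "?") :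
    is_variable (h :: t) = (false, h :: t) := by
  unfold is_variable
  simp [hh]

theorem seg_pos (t2 : List String) (hb : 0 < (t2.takeWhile pyIsalpha).length) :
    is_pattern_segment ("?" :: "*" :: t2) =
      (true, String.join ("?" :: "*" :: t2.takeWhile pyIsalpha) :: t2.drop (t2.takeWhile pyIsalpha).length) := by
  have ht2 : 0 < t2.length := by
    rcases t2 with _ | ⟨a, b⟩ <;> simp_all
  unfold is_pattern_segment
  dsimp only
  split_ifs with h1 h2
  · have h3 : 1 + (t2.takeWhile pyIsalpha).length + 1
        = ((t2.takeWhile pyIsalpha).length + 1) + 1 := by omega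
    rw [h3]
    simp [List.take_succ_cons, List.drop_succ_cons, take_length_takeWhile]
  · exact absurd (by omega : 1 + (t2.takeWhile pyIsalpha).length > 1) h2
  · exact absurd ⟨by simpa using by omega, rfl, rfl⟩ h1

theorem seg_zero (t2 : List String) (hb : (t2.takeWhile pyIsalpha).length = 0) :
    is_pattern_segment ("?" :: "*" :: t2) = (false, "?" :: "*" :: t2) := by
  unfold is_pattern_segment
  simp only [hb]
  split_ifs with h1 h2
  · omega
  · rfl
  · rfl

theorem seg_ne_head (h : String) (t : List String) (hh : ¬ h = "?") :
    is_pattern_segment (h :: t) = (false, h :: t) := by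
  unfold is_pattern_segment
  match t with
  | [] => simp
  | s :: t' => simp [hh]

theorem seg_ne_star (s : String) (t' : List String) (hs : ¬ s = "*") :
    is_pattern_segment ("?" :: s :: t') = (false, "?" :: s :: t') := by
  unfold is_pattern_segment
  simp [hs]

theorem seg_single : is_pattern_segment ["?"] = (false, ["?"]) := by
  unfold is_pattern_segment
  simp

theorem merge_pattern_var (p0 : String) (ps : List String) (X : String) (Y : List String)
    (hv : is_variable (p0 :: ps) = (true, X :: Y)) :
    merge_pattern (p0 :: ps) = X :: merge_pattern Y := by
  rw [merge_pattern, hv]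
  split
  · simp_all
  · rename_i x xs hq
    simp only [if_pos] at hq
    simp_all

theorem merge_pattern_seg (p0 : String) (ps : List String) (X : String) (Y : List String)
    (hv : is_variable (p0 :: ps) = (false, p0 :: ps))
    (hsg : is_pattern_segment (p0 :: ps) = (true, X :: Y)) :
    merge_pattern (p0 :: ps) = X :: merge_pattern Y := by
  rw [merge_pattern, hv]
  split
  · simp_all
  · rename_i x xs hq
    simp_all

theorem merge_pattern_none (p0 : String) (ps : List String)
    (hv : is_variable (p0 :: ps) = (false, p0 :: ps))
    (hsg : is_pattern_segment (p0 :: ps) = (false, p0 :: ps)) :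
    merge_pattern (p0 :: ps) = p0 :: merge_pattern ps := by
  rw [merge_pattern, hv]
  split
  · simp_all
  · rename_i x xs hq
    simp_all

theorem merge_eq_aux : ∀ (n : Nat) (pattern : List String), pattern.length ≤ n →
    merge_pattern pattern = merge_pattern_alt pattern := by
  intro n
  induction n with
  | zero =>
    intro pattern hlen
    have hp : pattern = [] := by cases pattern <;> simp_all
    subst hp
    rw [merge_pattern, merge_pattern_alt]
  | succ n ih =>
    intro pattern hlen
    rcases pattern with _ | ⟨h, t⟩
    · rw [merge_pattern, merge_pattern_alt]
    · have hlt : t.length ≤ n := by simp at hlen; omega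
      rw [merge_pattern_alt.eq_def]
      by_cases hh : h = "?"
      · subst hh
        by_cases hA : 0 < (t.takeWhile pyIsalpha).length
        · -- variable merge
          rw [merge_pattern_var _ _ _ _ (is_variable_pos t hA)]
          simp only [hA, if_true]
          refine congrArg _ (ih _ ?_)
          simp only [List.length_drop]; omega
        · have hA0 : (t.takeWhile pyIsalpha).length = 0 := by omega
          simp only [reduceIte, hA0, Nat.lt_irrefl, if_false]
          rcases t with _ | ⟨s, t2⟩
          · rw [merge_pattern_none _ _ (is_variable_zero [] hA0) seg_single]
            simp [merge_pattern, merge_pattern_alt]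
          · by_cases hs : s = "*"
            · subst hs
              by_cases hb : 0 < (t2.takeWhile pyIsalpha).length
              · have ht2 : 0 < t2.length := by
                  rcases t2 with _ | ⟨a, b⟩ <;> simp_all
                rw [merge_pattern_seg _ _ _ _ (is_variable_zero _ hA0) (seg_pos t2 hb)]
                simp only [ht2, hb, if_true]
                refine congrArg _ (ih _ ?_)
                simp only [List.length_drop]
                simp only [List.length_cons] at hlt
                omega
              · have hb0 : (t2.takeWhile pyIsalpha).length = 0 := by omega
                rw [merge_pattern_none _ _ (is_variable_zero _ hA0) (seg_zero t2 hb0)]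
                simp only [hb0, Nat.lt_irrefl, if_false]
                split_ifs <;> exact congrArg _ (ih _ hlt)
            · rw [merge_pattern_none _ _ (is_variable_zero _ hA0) (seg_ne_star s t2 hs)]
              split
              · exfalso; rename_i t2' ht'; simp_all
              · exact congrArg _ (ih _ hlt)
      · rw [merge_pattern_none _ _ (is_variable_ne h t hh) (seg_ne_head h t hh)]
        simp only [hh, if_false]
        exact congrArg _ (ih _ hlt)

theorem merge_eq (pattern : List String) : merge_pattern pattern = merge_pattern_alt pattern :=
  merge_eq_aux pattern.length pattern le_rfl

-- ===== VERDICT (by name: the statement is the Claim_ definition above) =====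
theorem merge_pattern_spec : Claim_equal_merge_pattern := by
  intro pattern _
  unfold Spec_merge_pattern
  exact merge_eq pattern
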